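-- pv_equiv track=rewrite | github.com/tubtrb/autoreport | autoreport/web/manual_ai_yaml.py | _has_unbalanced_single_quote
-- ===== SOURCE A (Python) =====
-- def _has_unbalanced_single_quote(line: str) -> bool:
--     quote_count = 0
--     index = 0
--     while index < len(line):
--         if line[index] != "'":
--             index += 1
--             continue
--         if index + 1 < len(line) and line[index + 1] == "'":
--             index += 2
--             continue
--         quote_count += 1
--         index += 1
--     return quote_count % 2 == 1
-- ===== SOURCE B (Python) =====
-- def _has_unbalanced_single_quote(line: str) -> bool:
--     # Doubled quotes contribute an even number, so only the total parity matters.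
--     return line.count("'") % 2 == 1
-- ===== Notes on version B (the rewrite author's own statement) =====
-- stated objective: simpler
-- what changed: Replaced the index-walking state machine that skips doubled quotes by a parity test on str.count of the quote character, justified by the invariant that each skipped pair contributes 2 to the total, leaving the parity unchanged.
import Mathlib
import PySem

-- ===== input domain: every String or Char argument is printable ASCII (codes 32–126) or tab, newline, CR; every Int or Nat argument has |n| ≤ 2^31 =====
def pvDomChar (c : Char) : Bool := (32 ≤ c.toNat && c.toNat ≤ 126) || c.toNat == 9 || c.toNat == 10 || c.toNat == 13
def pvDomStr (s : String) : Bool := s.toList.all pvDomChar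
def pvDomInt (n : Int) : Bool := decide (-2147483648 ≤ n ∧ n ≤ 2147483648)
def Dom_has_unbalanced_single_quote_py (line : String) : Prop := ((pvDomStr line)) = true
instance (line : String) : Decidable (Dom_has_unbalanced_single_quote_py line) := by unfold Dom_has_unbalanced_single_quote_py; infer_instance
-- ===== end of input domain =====

-- B replaces A's index-walking state machine by a plain quote-count parity test (objective: simpler).

-- ===== PORT A =====
-- A's while loop over the index, advancing by 1 (non-quote or lone quote, incrementing
-- quote_count for the latter) or by 2 (doubled quote), as structural recursion over the
-- remaining characters with the same quote_count accumulator.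
def pvALoop : List Char → Nat → Nat
  | [], q => q
  | [c], q => if c ≠ '\'' then q else q + 1          -- index + 1 = len: no lookahead
  | c :: c2 :: rest, q =>
    if c ≠ '\'' then pvALoop (c2 :: rest) q          -- index += 1
    else if c2 = '\'' then pvALoop rest q            -- doubled quote: index += 2
    else pvALoop (c2 :: rest) (q + 1)                -- lone quote

def has_unbalanced_single_quote_py (line : String) : Bool :=
  pvALoop line.toList 0 % 2 == 1

-- ===== PORT B =====
def has_unbalanced_single_quote_py_alt (line : String) : Bool :=
  PySem.Str.count line "'" % 2 == 1

-- ===== PRECONDITION & SPEC =====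
def Spec_has_unbalanced_single_quote_py (line : String) (out : Bool) : Prop := out = has_unbalanced_single_quote_py_alt line
instance (line : String) (out : Bool) : Decidable (Spec_has_unbalanced_single_quote_py line out) := by unfold Spec_has_unbalanced_single_quote_py; infer_instance

-- ===== CLAIM (what is proved, stated in full; the proofs are below) =====
def Claim_equal_has_unbalanced_single_quote_py : Prop := ∀ (line : String), Dom_has_unbalanced_single_quote_py line → Spec_has_unbalanced_single_quote_py line (has_unbalanced_single_quote_py line)

-- ===== LEMMAS AND PROOFS =====

-- Chars.count.go with a single-character needle consumes exactly one character per fuel step.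
lemma pvCountGo_single (fuel : Nat) : ∀ (l : List Char) (acc : Nat), l.length ≤ fuel →
    PySem.Chars.count.go ['\''] fuel l acc = acc + l.count '\'' := by
  induction fuel with
  | zero =>
    intro l acc h
    have : l = [] := List.eq_nil_of_length_eq_zero (Nat.le_zero.mp h)
    subst this; simp [PySem.Chars.count.go]
  | succ n ih =>
    intro l acc h
    cases l with
    | nil => simp [PySem.Chars.count.go]
    | cons c t =>
      by_cases hc : c = '\''
      · subst hc
        have hp : List.isPrefixOf ['\''] ('\'' :: t) = true := by
          simp [List.isPrefixOf]
        simp only [PySem.Chars.count.go, hp, if_pos, List.length_cons, List.length_nil,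
          List.drop_succ_cons, List.drop_zero]
        rw [ih t (acc + 1) (by simpa using h)]
        simp [List.count_cons]
        omega
      · have hp : List.isPrefixOf ['\''] (c :: t) = false := by
          simp [List.isPrefixOf]
          exact Ne.symm hc
        simp only [PySem.Chars.count.go, hp]
        rw [if_neg (by simp)]
        rw [ih t acc (by simpa using h)]
        simp [List.count_cons, hc]

lemma pvCount_single (cs : List Char) :
    PySem.Chars.count cs ['\''] = cs.count '\'' := by
  simp [PySem.Chars.count]
  simpa using pvCountGo_single cs.length cs 0 le_rfl

-- A's loop preserves the parity of (accumulator + number of quotes remaining).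
lemma pvALoop_parity (cs : List Char) (q : Nat) :
    pvALoop cs q % 2 = (q + cs.count '\'') % 2 := by
  induction cs, q using pvALoop.induct with
  | case1 q => simp [pvALoop]
  | case2 c q hc => simp [pvALoop, hc, List.count_cons]
  | case3 c q hc =>
    have hc' : c = '\'' := by by_contra h; exact hc h
    subst hc'; simp [pvALoop, List.count_cons]
  | case4 c c2 rest q hc ih =>
    simp only [pvALoop, if_pos hc]
    rw [ih]
    simp [List.count_cons, hc]
  | case5 c rest q hc ih =>
    have hc' : c = '\'' := by by_contra h; exact hc h
    subst hc'
    simp only [pvALoop, ne_eq, not_true_eq_false, if_false, reduceIte]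
    rw [ih]
    simp [List.count_cons]
    omega
  | case6 c c2 rest q hc hc2 ih =>
    have hc' : c = '\'' := by by_contra h; exact hc h
    subst hc'
    simp only [pvALoop, ne_eq, not_true_eq_false, if_false, reduceIte]
    rw [if_neg hc2, ih]
    simp [List.count_cons, hc2]
    omega

-- ===== VERDICT (by name: the statement is the Claim_ definition above) =====
theorem has_unbalanced_single_quote_py_spec : Claim_equal_has_unbalanced_single_quote_py := by
  intro line _
  unfold Spec_has_unbalanced_single_quote_py
  unfold has_unbalanced_single_quote_py has_unbalanced_single_quote_py_alt
  rw [PySem.Str.count_eq]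
  have : ("'" : String).toList = ['\''] := rfl
  rw [this, pvCount_single, pvALoop_parity]
  simp
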